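-- pv_equiv track=rewrite | github.com/dohui-son/Python-Algorithms | codility/a_NailingPlanks.py | solution
-- ===== SOURCE A (Python) =====
-- def check(a,b,c,num):
--     pNails = [0]*(2*len(c)+1)
--     for i in range(num+1): pNails[c[i]] +=1
--     pnlen = len(pNails)
--     for i in range(1, pnlen): pNails[i] += pNails[i-1]
--     alen = len(a)
--     for i in range(alen):
--         if pNails[b[i]] <= pNails[a[i]-1]:  return False
--     return True
--
-- def solution(A, B, C):
--     s, e, ans = 0, len(C)-1, -1
--     while s<=e:
--         mid = (s+e)//2
--         if check(A,B,C,mid):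
--             e = mid-1
--             ans = mid+1
--         else: s = mid+1
--     return ans
-- ===== SOURCE B (Python) =====
-- def solution(A, B, C):
--     best = 0
--     for a, b in zip(A, B):
--         hit = None
--         for j, c in enumerate(C):
--             if a <= c <= b:
--                 hit = j
--                 break
--         if hit is None:
--             return -1
--         best = max(best, hit + 1)
--     return best
-- ===== Notes on version B (the rewrite author's own statement) =====
-- stated objective: alternative
-- what changed: Replaces the binary search over nail counts (each probe rebuilding a counting array with prefix sums) by a direct per-plank scan: for each plank find the first nail index that lands on it and return the maximum such index plus one (-1 if some plank has no nail), with no counting array and no binary search.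
-- intended difference: On inputs where every plank has a covering nail yet the plank list zip(A, B) is not a nonempty list of 1-based planks (it is empty, or some plank starts at a non-positive position, the blind spot of A's 1-based counting array whose pNails[a[i]-1] wraps so the plank never counts as nailed), A returns -1 or an accidental 1 from its vacuous check, where B returns the true minimal number of nails. — e.g. on solution([], [], [1]): A returns 1, B returns 0
-- outside the precondition, e.g. on solution([-4], [3], [-1, 3]): A returns 2, B returns 1; on solution([-2], [2], [1]): A returns 1, B returns 1
import Mathlib
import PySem

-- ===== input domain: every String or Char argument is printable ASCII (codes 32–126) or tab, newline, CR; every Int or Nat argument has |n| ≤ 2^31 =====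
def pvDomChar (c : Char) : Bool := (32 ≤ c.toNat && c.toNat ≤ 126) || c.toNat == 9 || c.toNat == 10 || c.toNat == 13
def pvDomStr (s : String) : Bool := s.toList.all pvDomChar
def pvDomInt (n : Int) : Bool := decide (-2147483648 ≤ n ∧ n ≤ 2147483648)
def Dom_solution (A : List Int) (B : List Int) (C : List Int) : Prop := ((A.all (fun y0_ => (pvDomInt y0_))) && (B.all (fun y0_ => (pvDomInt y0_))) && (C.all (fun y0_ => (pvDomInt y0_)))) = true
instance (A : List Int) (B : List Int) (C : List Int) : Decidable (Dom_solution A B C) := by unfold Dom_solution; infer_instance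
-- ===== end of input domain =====

-- B replaces A's binary search over nail counts (rebuilding a counting array per probe) by a direct
-- per-plank scan for the first covering nail, taking the maximum index + 1 (alternative decomposition).


-- ===== PORT A =====
-- 'for i in range(alen): if pNails[b[i]] <= pNails[a[i]-1]: return False' / 'return True'
def pvCheckLoop (a b pN : List Int) : List Int → Bool
  | [] => true
  | i :: rest =>
    if PySem.List.pyGetD pN (PySem.List.pyGetD b i 0) 0 ≤ PySem.List.pyGetD pN (PySem.List.pyGetD a i 0 - 1) 0
    then false else pvCheckLoop a b pN rest

-- check(a,b,c,num); pyGetD/pySetD are the total forms of Python indexing, exact on the indices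
-- admitted by Pre_solution (Python raises IndexError outside them).
def pvCheck (a b c : List Int) (num : Int) : Bool :=
  let pNails0 := List.replicate (2 * c.length + 1) (0 : Int)
  let pNails1 := (PySem.List.pyRange 0 (num + 1) 1).foldl
    (fun pN i => PySem.List.pySetD pN (PySem.List.pyGetD c i 0)
        (PySem.List.pyGetD pN (PySem.List.pyGetD c i 0) 0 + 1)) pNails0
  let pnlen := pNails1.length
  let pNails2 := (PySem.List.pyRange 1 (pnlen : Int) 1).foldl
    (fun pN i => PySem.List.pySetD pN i
        (PySem.List.pyGetD pN i 0 + PySem.List.pyGetD pN (i - 1) 0)) pNails1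
  pvCheckLoop a b pNails2 (PySem.List.pyRange 0 (a.length : Int) 1)

-- the 'while s <= e' binary-search loop
def pvBS (A B C : List Int) (s e ans : Int) : Int :=
  if h : s ≤ e then
    let mid := PySem.Int.floordiv (s + e) 2
    if pvCheck A B C mid then pvBS A B C s (mid - 1) (mid + 1)
    else pvBS A B C (mid + 1) e ans
  else ans
termination_by (e + 1 - s).toNat
decreasing_by
  · have hm := PySem.Int.floordiv_two_mid_bounds h
    omega
  · have hm := PySem.Int.floordiv_two_mid_bounds h
    omega

def solution (A : List Int) (B : List Int) (C : List Int) : Int :=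
  pvBS A B C 0 ((C.length : Int) - 1) (-1)

-- ===== PORT B =====
-- inner 'for j, c in enumerate(C): if a <= c <= b: hit = j; break'
def pvFirstNail (a b : Int) : List Int → Int → Option Int
  | [], _ => none
  | c :: rest, j => if a ≤ c ∧ c ≤ b then some j else pvFirstNail a b rest (j + 1)

-- outer 'for a, b in zip(A, B)' loop carrying best
def pvGo (C : List Int) : List (Int × Int) → Int → Int
  | [], best => best
  | p :: rest, best =>
    match pvFirstNail p.1 p.2 C 0 with
    | none => -1
    | some j => pvGo C rest (max best (j + 1))

def solution_alt (A : List Int) (B : List Int) (C : List Int) : Int :=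
  pvGo C (A.zip B) 0

-- ===== PRECONDITION & SPEC =====
-- Pre_ restricts to inputs where A runs raise-free: either no planks (A = []) with the nail values
-- A actually reads inside the counting array's index range, or at least one plank and: no nails
-- (then A returns -1 for any plank values), or nail values in the natural range 0..2*len(C) with
-- either all plank positions in the natural 1-based range or a raise-free plank no nail covers, or
-- nail values merely indexable with a raise-free plank whose wrapped counting-array window holds no
-- wrapped nail position AND some plank genuinely uncoverable, or nail values indexable with a
-- raise-free plank touching position <= 0 that spans at most the counting array (its wrapped test
-- then fails at every probe).  Outside Pre_ A raises IndexError, or a plank spanning more than the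
-- counting array makes A's wrapped test coincide accidentally with unrelated nails (e.g. on
-- ([-4], [3], [-1, 3]) A returns 2 where B returns 1, and on ([-2], [2], [1]) both happen to
-- return 1); B does not reproduce that coincidence, it is outside the task's 1-based domain.
def Pre_solution (A : List Int) (B : List Int) (C : List Int) : Prop :=
  (A = [] ∧
    (∀ j : Nat, j ≤ (C.length - 1) / 2 →
      -(2 * (C.length : Int) + 1) ≤ C.getD j 0 ∧ C.getD j 0 ≤ 2 * (C.length : Int))) ∨
  (A ≠ [] ∧
  (C = [] ∨
    (C ≠ [] ∧
     (((∀ c ∈ C, 0 ≤ c ∧ c ≤ 2 * (C.length : Int)) ∧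
       ((A.length ≤ B.length ∧ (∀ a ∈ A, 1 ≤ a ∧ a ≤ 2 * (C.length : Int) + 1) ∧
         (∀ b ∈ B.take A.length, 0 ≤ b ∧ b ≤ 2 * (C.length : Int))) ∨
        (∃ i, i < A.length ∧ i < B.length ∧
          (∀ i' : Nat, i' < i →
            -(2 * (C.length : Int) + 1) ≤ A.getD i' 0 - 1 ∧ A.getD i' 0 - 1 ≤ 2 * (C.length : Int) ∧
            -(2 * (C.length : Int) + 1) ≤ B.getD i' 0 ∧ B.getD i' 0 ≤ 2 * (C.length : Int)) ∧
          1 ≤ A.getD i 0 ∧ A.getD i 0 ≤ 2 * (C.length : Int) + 1 ∧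
          0 ≤ B.getD i 0 ∧ B.getD i 0 ≤ 2 * (C.length : Int) ∧
          (∀ c ∈ C, ¬(A.getD i 0 ≤ c ∧ c ≤ B.getD i 0))))) ∨
      ((∀ c ∈ C, -(2 * (C.length : Int) + 1) ≤ c ∧ c ≤ 2 * (C.length : Int)) ∧
       (∃ i, i < A.length ∧ i < B.length ∧
         (∀ i' : Nat, i' < i →
           -(2 * (C.length : Int) + 1) ≤ A.getD i' 0 - 1 ∧ A.getD i' 0 - 1 ≤ 2 * (C.length : Int) ∧
           -(2 * (C.length : Int) + 1) ≤ B.getD i' 0 ∧ B.getD i' 0 ≤ 2 * (C.length : Int)) ∧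
         -(2 * (C.length : Int) + 1) ≤ A.getD i 0 - 1 ∧ A.getD i 0 - 1 ≤ 2 * (C.length : Int) ∧
         -(2 * (C.length : Int) + 1) ≤ B.getD i 0 ∧ B.getD i 0 ≤ 2 * (C.length : Int) ∧
         (∀ c ∈ C, ¬((if A.getD i 0 - 1 < 0 then A.getD i 0 - 1 + 2 * (C.length : Int) + 1
                       else A.getD i 0 - 1) <
                      (if c < 0 then c + 2 * (C.length : Int) + 1 else c) ∧
                     (if c < 0 then c + 2 * (C.length : Int) + 1 else c) ≤
                      (if B.getD i 0 < 0 then B.getD i 0 + 2 * (C.length : Int) + 1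
                       else B.getD i 0))) ∧
         (∃ i2, i2 < A.length ∧ i2 < B.length ∧
           (∀ c ∈ C, ¬(A.getD i2 0 ≤ c ∧ c ≤ B.getD i2 0))))) ∨
      ((∀ c ∈ C, -(2 * (C.length : Int) + 1) ≤ c ∧ c ≤ 2 * (C.length : Int)) ∧
       (∃ i, i < A.length ∧ i < B.length ∧
         (∀ i' : Nat, i' < i →
           -(2 * (C.length : Int) + 1) ≤ A.getD i' 0 - 1 ∧ A.getD i' 0 - 1 ≤ 2 * (C.length : Int) ∧
           -(2 * (C.length : Int) + 1) ≤ B.getD i' 0 ∧ B.getD i' 0 ≤ 2 * (C.length : Int)) ∧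
         A.getD i 0 ≤ 0 ∧ -(2 * (C.length : Int) + 1) ≤ A.getD i 0 - 1 ∧
         0 ≤ B.getD i 0 ∧ B.getD i 0 ≤ 2 * (C.length : Int) ∧
         B.getD i 0 ≤ A.getD i 0 + 2 * (C.length : Int)))))))
set_option maxHeartbeats 2000000 in
instance (A : List Int) (B : List Int) (C : List Int) : Decidable (Pre_solution A B C) := by
  unfold Pre_solution
  refine @instDecidableOr _ _ ?_ (@instDecidableAnd _ _ ?_ (@instDecidableOr _ _ ?_
    (@instDecidableAnd _ _ ?_ (@instDecidableOr _ _
      (@instDecidableAnd _ _ ?_ (@instDecidableOr _ _ ?_ ?_))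
      (@instDecidableOr _ _ ?_ ?_))))) <;>
    infer_instance

def pvWitness_solution : List Int × List Int × List Int := ([1], [2], [1])

-- On inputs where every plank has a covering nail yet the plank list zip(A, B) is not a nonempty
-- list of 1-based planks (it is empty, or some plank starts at a non-positive position, the blind
-- spot of A's 1-based counting array, whose 'pNails[a[i]-1]' wraps so the plank never counts as
-- nailed), A returns -1 (or an accidental 1 from its vacuous check) where B returns the true
-- minimal number of nails.
def D_solution (A : List Int) (B : List Int) (C : List Int) : Prop :=
  (∀ p ∈ A.zip B, ∃ c ∈ C, p.1 ≤ c ∧ c ≤ p.2) ∧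
  ¬(A.zip B ≠ [] ∧ ∀ p ∈ A.zip B, 1 ≤ p.1)
instance (A : List Int) (B : List Int) (C : List Int) : Decidable (D_solution A B C) := by
  unfold D_solution; infer_instance

def Spec_solution (A : List Int) (B : List Int) (C : List Int) (out : Int) : Prop := ¬ D_solution A B C → out = solution_alt A B C
instance (A : List Int) (B : List Int) (C : List Int) (out : Int) : Decidable (Spec_solution A B C out) := by unfold Spec_solution; infer_instance

def pvDiffWitness_solution : List Int × List Int × List Int := ([], [], [1])
def pvDiffWitnessOut_solution : Int × Int := (1, 0)

-- ===== CLAIM (what is proved, stated in full; the proofs are below) =====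
def Claim_unchanged_solution : Prop := ∀ (A : List Int) (B : List Int) (C : List Int), Dom_solution A B C → Pre_solution A B C → Spec_solution A B C (solution A B C)
def Claim_changed_solution : Prop := Dom_solution (pvDiffWitness_solution.1) (pvDiffWitness_solution.2.1) (pvDiffWitness_solution.2.2) ∧ Pre_solution (pvDiffWitness_solution.1) (pvDiffWitness_solution.2.1) (pvDiffWitness_solution.2.2) ∧ D_solution (pvDiffWitness_solution.1) (pvDiffWitness_solution.2.1) (pvDiffWitness_solution.2.2) ∧ solution (pvDiffWitness_solution.1) (pvDiffWitness_solution.2.1) (pvDiffWitness_solution.2.2) = pvDiffWitnessOut_solution.1 ∧ solution_alt (pvDiffWitness_solution.1) (pvDiffWitness_solution.2.1) (pvDiffWitness_solution.2.2) = pvDiffWitnessOut_solution.2 ∧ pvDiffWitnessOut_solution.1 ≠ pvDiffWitnessOut_solution.2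
def Claim_exact_solution : Prop := ∀ (A : List Int) (B : List Int) (C : List Int), Dom_solution A B C → Pre_solution A B C → D_solution A B C → solution A B C ≠ solution_alt A B C

-- ===== LEMMAS AND PROOFS =====

-- ---- counting helpers ----
lemma pv_countP_le_succ (T : List Int) (x : Int) :
    T.countP (fun c => decide (c ≤ x + 1)) =
    T.countP (fun c => decide (c ≤ x)) + T.countP (fun c => decide (c = x + 1)) := by
  induction T with
  | nil => simp
  | cons c t ih =>
    simp only [List.countP_cons, ih]
    by_cases h1 : c ≤ x + 1 <;> by_cases h2 : c ≤ x <;> by_cases h3 : c = x + 1 <;>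
      simp [h1, h2, h3] <;> omega

lemma pv_cnt_mono (l : List Int) (x y : Int) (h : x ≤ y) :
    l.countP (fun c => decide (c ≤ x)) ≤ l.countP (fun c => decide (c ≤ y)) :=
  List.countP_mono_left (by intro c _ hc; simp only [decide_eq_true_eq] at *; omega)

lemma pv_cnt_lt_iff (a b : Int) (l : List Int) :
    l.countP (fun c => decide (c ≤ a - 1)) < l.countP (fun c => decide (c ≤ b)) ↔
    ∃ c ∈ l, a ≤ c ∧ c ≤ b := by
  constructor
  · intro h; by_contra hno
    have hle : l.countP (fun c => decide (c ≤ b)) ≤ l.countP (fun c => decide (c ≤ a - 1)) := by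
      refine List.countP_mono_left ?_
      intro c hc hcb
      simp only [decide_eq_true_eq] at hcb ⊢
      by_contra hlt
      exact hno ⟨c, hc, by omega, hcb⟩
    omega
  · rintro ⟨c0, hc0, hac, hcb⟩
    induction l with
    | nil => cases hc0
    | cons c t ih =>
      have hab : a - 1 ≤ b := by omega
      have hmono := pv_cnt_mono t (a - 1) b hab
      simp only [List.countP_cons]
      rcases List.mem_cons.mp hc0 with rfl | hmem
      · split_ifs <;> simp only [decide_eq_true_eq] at * <;> omega
      · have hih := ih hmem
        split_ifs <;> simp only [decide_eq_true_eq] at * <;> omega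

lemma pv_mem_take_mono {k k' : Nat} (h : k ≤ k') {l : List Int} {x : Int}
    (hx : x ∈ l.take k) : x ∈ l.take k' := by
  have h2 : l.take k = (l.take k').take k := by rw [List.take_take, Nat.min_eq_left h]
  rw [h2] at hx; exact List.mem_of_mem_take hx

-- ---- pvFirstNail (B's inner scan) ----
lemma pv_fn_shift (a b : Int) (l : List Int) (s : Int) :
    pvFirstNail a b l s = (pvFirstNail a b l 0).map (fun j => j + s) := by
  induction l generalizing s with
  | nil => rfl
  | cons c t ih =>
    simp only [pvFirstNail]
    by_cases h : a ≤ c ∧ c ≤ b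
    · simp [h]
    · rw [if_neg h, if_neg h, ih (s + 1), ih (0 + 1), Option.map_map]
      congr 1; funext j; simp; ring

lemma pv_fn_nonneg (a b : Int) (l : List Int) (j : Int)
    (h : pvFirstNail a b l 0 = some j) : 0 ≤ j := by
  induction l generalizing j with
  | nil => cases h
  | cons c t ih =>
    simp only [pvFirstNail] at h
    by_cases hc : a ≤ c ∧ c ≤ b
    · rw [if_pos hc] at h; cases h; omega
    · rw [if_neg hc, pv_fn_shift a b t (0 + 1)] at h
      cases hF : pvFirstNail a b t 0 with
      | none => rw [hF] at h; cases h
      | some j' => rw [hF] at h; simp at h; have := ih j' hF; omega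

lemma pv_fn_none_iff (a b : Int) (l : List Int) :
    pvFirstNail a b l 0 = none ↔ ∀ c ∈ l, ¬(a ≤ c ∧ c ≤ b) := by
  induction l with
  | nil => simp [pvFirstNail]
  | cons c t ih =>
    simp only [pvFirstNail]
    by_cases hc : a ≤ c ∧ c ≤ b
    · simp [hc]
    · rw [if_neg hc, pv_fn_shift a b t (0 + 1)]
      simp only [Option.map_eq_none_iff, ih]
      constructor
      · intro h c' hc'; rcases List.mem_cons.mp hc' with rfl | hm
        · exact hc
        · exact h c' hm
      · intro h c' hm; exact h c' (List.mem_cons_of_mem _ hm)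

lemma pv_fn_lt_length (a b : Int) (l : List Int) (j : Int)
    (h : pvFirstNail a b l 0 = some j) : j < (l.length : Int) := by
  induction l generalizing j with
  | nil => cases h
  | cons c t ih =>
    simp only [pvFirstNail] at h
    by_cases hc : a ≤ c ∧ c ≤ b
    · rw [if_pos hc] at h; cases h; simp only [List.length_cons]; push_cast; omega
    · rw [if_neg hc, pv_fn_shift a b t (0 + 1)] at h
      cases hF : pvFirstNail a b t 0 with
      | none => rw [hF] at h; cases h
      | some j' =>
        rw [hF] at h; simp at h
        have := ih j' hF
        simp only [List.length_cons]
        push_cast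
        omega

lemma pv_fn_take_iff (a b : Int) (l : List Int) (k : Nat) :
    (∃ c ∈ l.take k, a ≤ c ∧ c ≤ b) ↔
    (∃ j, pvFirstNail a b l 0 = some j ∧ j < (k : Int)) := by
  induction l generalizing k with
  | nil => simp [pvFirstNail]
  | cons c t ih =>
    cases k with
    | zero =>
      simp only [List.take_zero, Nat.cast_zero]
      constructor
      · rintro ⟨c', hc', _⟩; cases hc'
      · rintro ⟨j, hj, hlt⟩; have := pv_fn_nonneg a b _ j hj; omega
    | succ k' =>
      rw [List.take_succ_cons]
      simp only [pvFirstNail]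
      by_cases hc : a ≤ c ∧ c ≤ b
      · rw [if_pos hc]
        constructor
        · intro _; exact ⟨0, rfl, by push_cast; omega⟩
        · intro _; exact ⟨c, List.mem_cons_self, hc⟩
      · rw [if_neg hc, pv_fn_shift a b t (0 + 1)]
        constructor
        · rintro ⟨c', hc', h1, h2⟩
          rcases List.mem_cons.mp hc' with rfl | hm
          · exact absurd ⟨h1, h2⟩ hc
          · obtain ⟨j, hj, hlt⟩ := (ih k').mp ⟨c', hm, h1, h2⟩
            exact ⟨j + 1, by rw [hj]; rfl, by push_cast; omega⟩
        · rintro ⟨j, hj, hlt⟩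
          cases hF : pvFirstNail a b t 0 with
          | none => rw [hF] at hj; cases hj
          | some j' =>
            rw [hF] at hj; simp at hj
            obtain ⟨c', hm, h1, h2⟩ := (ih k').mpr ⟨j', hF, by push_cast at hlt ⊢; omega⟩
            exact ⟨c', List.mem_cons_of_mem _ hm, h1, h2⟩

-- ---- pvGo (B's outer loop) ----
lemma pv_go_none (C : List Int) (ps : List (Int × Int)) (best : Int)
    (h : ∃ p ∈ ps, pvFirstNail p.1 p.2 C 0 = none) : pvGo C ps best = -1 := by
  induction ps generalizing best with
  | nil => rcases h with ⟨p, hp, _⟩; cases hp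
  | cons q rest ih =>
    rcases h with ⟨p, hp, hF⟩
    rcases List.mem_cons.mp hp with rfl | hmem
    · simp only [pvGo, hF]
    · cases hq : pvFirstNail q.1 q.2 C 0 with
      | none => simp only [pvGo, hq]
      | some j => simp only [pvGo, hq]; exact ih _ ⟨p, hmem, hF⟩

lemma pv_go_ge (C : List Int) (ps : List (Int × Int)) (best : Int)
    (hall : ∀ p ∈ ps, ∃ j, pvFirstNail p.1 p.2 C 0 = some j) : best ≤ pvGo C ps best := by
  induction ps generalizing best with
  | nil => simp [pvGo]
  | cons q rest ih =>
    obtain ⟨jq, hq⟩ := hall q List.mem_cons_self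
    simp only [pvGo, hq]
    have h1 : best ≤ max best (jq + 1) := le_max_left _ _
    have h2 := ih (max best (jq + 1)) (fun p hp => hall p (List.mem_cons_of_mem _ hp))
    omega

lemma pv_go_ub (C : List Int) (ps : List (Int × Int)) (best : Int)
    (hall : ∀ p ∈ ps, ∃ j, pvFirstNail p.1 p.2 C 0 = some j) :
    ∀ p ∈ ps, ∀ j, pvFirstNail p.1 p.2 C 0 = some j → j + 1 ≤ pvGo C ps best := by
  induction ps generalizing best with
  | nil => intro p hp; cases hp
  | cons q rest ih =>
    intro p hp j hF
    obtain ⟨jq, hq⟩ := hall q List.mem_cons_self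
    simp only [pvGo, hq]
    have hall' : ∀ p ∈ rest, ∃ j, pvFirstNail p.1 p.2 C 0 = some j :=
      fun p hp => hall p (List.mem_cons_of_mem _ hp)
    rcases List.mem_cons.mp hp with rfl | hmem
    · rw [hF] at hq; cases hq
      have h1 : j + 1 ≤ max best (j + 1) := le_max_right _ _
      have h2 := pv_go_ge C rest (max best (j + 1)) hall'
      omega
    · exact ih _ hall' p hmem j hF

lemma pv_go_max (C : List Int) (ps : List (Int × Int)) (best : Int)
    (hall : ∀ p ∈ ps, ∃ j, pvFirstNail p.1 p.2 C 0 = some j) :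
    pvGo C ps best = best ∨
    ∃ p ∈ ps, ∃ j, pvFirstNail p.1 p.2 C 0 = some j ∧ pvGo C ps best = j + 1 := by
  induction ps generalizing best with
  | nil => left; rfl
  | cons q rest ih =>
    obtain ⟨jq, hq⟩ := hall q List.mem_cons_self
    have hall' : ∀ p ∈ rest, ∃ j, pvFirstNail p.1 p.2 C 0 = some j :=
      fun p hp => hall p (List.mem_cons_of_mem _ hp)
    simp only [pvGo, hq]
    rcases ih (max best (jq + 1)) hall' with heq | ⟨p, hp, j, hF, he⟩
    · rcases le_total (jq + 1) best with hb | hb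
      · left; rw [heq]; omega
      · right; exact ⟨q, List.mem_cons_self, jq, hq, by rw [heq]; omega⟩
    · right; exact ⟨p, List.mem_cons_of_mem _ hp, j, hF, he⟩

-- ---- the check loop over planks ----
lemma pv_checkLoop_iff (a b pN : List Int) (l : List Int) :
    pvCheckLoop a b pN l = true ↔
    ∀ i ∈ l, ¬(PySem.List.pyGetD pN (PySem.List.pyGetD b i 0) 0 ≤
               PySem.List.pyGetD pN (PySem.List.pyGetD a i 0 - 1) 0) := by
  induction l with
  | nil => simp [pvCheckLoop]
  | cons i rest ih =>
    simp only [pvCheckLoop]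
    split_ifs with h
    · simp only [List.mem_cons]
      constructor
      · intro hfalse; cases hfalse
      · intro hall; exact absurd h (hall i (Or.inl rfl))
    · rw [ih]
      constructor
      · intro hall i' hi'
        rcases List.mem_cons.mp hi' with rfl | hm
        · exact h
        · exact hall i' hm
      · intro hall i' hm; exact hall i' (List.mem_cons_of_mem _ hm)

-- ---- first pass: the counting array after 'for i in range(num+1): pNails[c[i]] += 1' ----
lemma pv_step1 (C' : List Int) (n : Nat) (HC : ∀ c ∈ C', 0 ≤ c ∧ c < (n : Int))
    (l0 : List Int) (hl : l0.length = n) :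
    ∀ k : Nat, k ≤ C'.length →
    (((PySem.List.pyRange 0 (k : Int) 1).foldl
        (fun pN i => PySem.List.pySetD pN (PySem.List.pyGetD C' i 0)
          (PySem.List.pyGetD pN (PySem.List.pyGetD C' i 0) 0 + 1)) l0).length = n ∧
     ∀ p : Nat, p < n →
        PySem.List.pyGetD ((PySem.List.pyRange 0 (k : Int) 1).foldl
          (fun pN i => PySem.List.pySetD pN (PySem.List.pyGetD C' i 0)
            (PySem.List.pyGetD pN (PySem.List.pyGetD C' i 0) 0 + 1)) l0) (p : Int) 0
        = PySem.List.pyGetD l0 (p : Int) 0 +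
          ((C'.take k).countP (fun c => decide (c = (p : Int))) : Int)) := by
  intro k
  induction k with
  | zero =>
    intro _
    rw [show ((0 : Nat) : Int) = 0 by simp, PySem.List.pyRange_one_eq_nil (le_refl 0)]
    simp [hl]
  | succ k ih =>
    intro hk
    obtain ⟨ihlen, ihval⟩ := ih (by omega)
    have hkC : k < C'.length := by omega
    have hsplit : PySem.List.pyRange 0 ((k : Int) + 1) 1 =
        PySem.List.pyRange 0 (k : Int) 1 ++ [(k : Int)] :=
      PySem.List.pyRange_one_succ_right (by positivity)
    rw [show ((k + 1 : Nat) : Int) = (k : Int) + 1 by push_cast; ring, hsplit, List.foldl_append,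
        List.foldl_cons, List.foldl_nil]
    have hck : PySem.List.pyGetD C' (k : Int) 0 = C'[k] := by
      rw [PySem.List.pyGetD_natCast, List.getD_eq_getElem _ _ hkC]
    have hc := HC C'[k] (List.getElem_mem hkC)
    obtain ⟨m, hm⟩ : ∃ m : Nat, C'[k] = (m : Int) :=
      ⟨(C'[k]).toNat, (Int.toNat_of_nonneg hc.1).symm⟩
    have hmn : m < n := by omega
    rw [hck, hm]
    have htake : C'.take (k + 1) = C'.take k ++ [(m : Int)] := by
      rw [List.take_add_one, List.getElem?_eq_getElem hkC, hm]; rfl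
    constructor
    · rw [PySem.List.length_pySetD, ihlen]
    · intro p hp
      rw [PySem.List.pyGetD_pySetD_natCast _ m p _ 0 (by rw [ihlen]; exact hmn)]
      rw [htake, List.countP_append]
      by_cases hpm : p = m
      · subst hpm
        rw [if_pos rfl, ihval p hp]
        simp
        omega
      · rw [if_neg (by omega), ihval p hp]
        have : ((m : Int) = (p : Int)) = False := by
          simp only [eq_iff_iff, iff_false]; intro hcon; exact hpm (by exact_mod_cast hcon.symm)
        simp [this]

-- ---- second pass: prefix sums 'for i in range(1, pnlen): pNails[i] += pNails[i-1]' ----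
lemma pv_step2 (n : Nat) (l : List Int) (hl : l.length = n) :
    ∀ m : Nat, m ≤ n →
    (((PySem.List.pyRange 1 (m : Int) 1).foldl
        (fun pN i => PySem.List.pySetD pN i
          (PySem.List.pyGetD pN i 0 + PySem.List.pyGetD pN (i - 1) 0)) l).length = n ∧
     ∀ p : Nat, p < n →
        PySem.List.pyGetD ((PySem.List.pyRange 1 (m : Int) 1).foldl
          (fun pN i => PySem.List.pySetD pN i
            (PySem.List.pyGetD pN i 0 + PySem.List.pyGetD pN (i - 1) 0)) l) (p : Int) 0
        = if p < m then (l.take (p + 1)).sum else PySem.List.pyGetD l (p : Int) 0) := by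
  intro m
  induction m with
  | zero =>
    intro _
    rw [show ((0 : Nat) : Int) = 0 by simp, PySem.List.pyRange_one_eq_nil (by omega)]
    simp [hl]
  | succ m ih =>
    intro hm
    rcases Nat.eq_zero_or_pos m with rfl | hmpos
    · rw [show ((0 + 1 : Nat) : Int) = 1 by simp, PySem.List.pyRange_one_eq_nil (le_refl 1)]
      refine ⟨hl, ?_⟩
      intro p hp
      rcases Nat.eq_zero_or_pos p with rfl | hppos
      · rw [if_pos (by omega)]
        cases l with
        | nil => simp at hl; omega
        | cons x t =>
          rw [show ((0 : Nat) : Int) = 0 by simp]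
          simp [PySem.List.pyGetD]
      · rw [if_neg (by omega)]; rfl
    · obtain ⟨ihlen, ihval⟩ := ih (by omega)
      have hsplit : PySem.List.pyRange 1 ((m : Int) + 1) 1 =
          PySem.List.pyRange 1 (m : Int) 1 ++ [(m : Int)] :=
        PySem.List.pyRange_one_succ_right (by exact_mod_cast hmpos)
      rw [show ((m + 1 : Nat) : Int) = (m : Int) + 1 by push_cast; ring, hsplit, List.foldl_append,
          List.foldl_cons, List.foldl_nil]
      have hmn : m < n := by omega
      have hself : PySem.List.pyGetD ((PySem.List.pyRange 1 (m : Int) 1).foldl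
          (fun pN i => PySem.List.pySetD pN i
            (PySem.List.pyGetD pN i 0 + PySem.List.pyGetD pN (i - 1) 0)) l) (m : Int) 0
          = PySem.List.pyGetD l (m : Int) 0 := by
        rw [ihval m hmn, if_neg (by omega)]
      have hprev : PySem.List.pyGetD ((PySem.List.pyRange 1 (m : Int) 1).foldl
          (fun pN i => PySem.List.pySetD pN i
            (PySem.List.pyGetD pN i 0 + PySem.List.pyGetD pN (i - 1) 0)) l) ((m : Int) - 1) 0
          = (l.take (m - 1 + 1)).sum := by
        rw [show (m : Int) - 1 = ((m - 1 : Nat) : Int) by omega, ihval (m - 1) (by omega),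
            if_pos (by omega)]
      constructor
      · rw [PySem.List.length_pySetD, ihlen]
      · intro p hp
        rw [hself, hprev]
        rw [PySem.List.pyGetD_pySetD_natCast _ m p _ 0 (by rw [ihlen]; exact hmn)]
        have hlm : PySem.List.pyGetD l (m : Int) 0 = l[m]'(by omega) := by
          rw [PySem.List.pyGetD_natCast, List.getD_eq_getElem _ _ (by omega)]
        by_cases hpm : p = m
        · subst hpm
          rw [if_pos rfl, if_pos (by omega)]
          rw [show p - 1 + 1 = p by omega]
          rw [List.take_add_one, List.getElem?_eq_getElem (show p < l.length by omega),
              List.sum_append, hlm]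
          simp
          omega
        · rw [if_neg hpm, ihval p hp]
          by_cases hplt : p < m
          · rw [if_pos hplt, if_pos (by omega)]
          · rw [if_neg hplt, if_neg (by omega)]

-- ---- prefix sums of the counting array are '#nails at positions ≤ p' ----
lemma pv_sum_take (T : List Int) (n : Nat) (hT0 : ∀ c ∈ T, 0 ≤ c)
    (l1 : List Int) (hlen : l1.length = n)
    (hval : ∀ q : Nat, q < n →
      PySem.List.pyGetD l1 (q : Int) 0 = ((T.countP (fun c => decide (c = (q : Int)))) : Int)) :
    ∀ p : Nat, p < n →
      (l1.take (p + 1)).sum = ((T.countP (fun c => decide (c ≤ (p : Int)))) : Int) := by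
  intro p
  induction p with
  | zero =>
    intro hp
    have h0 := hval 0 hp
    cases l1 with
    | nil => simp at hlen; omega
    | cons x t =>
      rw [show ((0 : Nat) : Int) = 0 by simp] at h0
      simp only [PySem.List.pyGetD, PySem.List.pyGet?_zero_cons, Option.getD_some] at h0
      have hcong : T.countP (fun c => decide (c ≤ ((0 : Nat) : Int))) =
          T.countP (fun c => decide (c = ((0 : Nat) : Int))) := by
        refine List.countP_congr ?_
        intro c hc
        have h1 := hT0 c hc
        simp
        omega
      rw [hcong]
      rw [show (x :: t).take (0 + 1) = [x] from rfl]
      simpa using h0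
  | succ p ih =>
    intro hp
    have hsum := ih (by omega)
    rw [List.take_add_one, List.getElem?_eq_getElem (by omega : p + 1 < l1.length),
        List.sum_append]
    have hv := hval (p + 1) hp
    rw [PySem.List.pyGetD_natCast, List.getD_eq_getElem _ _ (by omega)] at hv
    have hstep := pv_countP_le_succ T (p : Int)
    have hc1 : ((p + 1 : Nat) : Int) = (p : Int) + 1 := by push_cast; ring
    rw [hc1] at hv ⊢
    simp only [Option.toList_some, List.sum_cons, List.sum_nil, add_zero]
    rw [hsum, hv, hstep]
    push_cast
    ring

-- ---- characterization of check: every plank is covered by one of the first num+1 nails ----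
def pvCov (A B C : List Int) (m : Int) : Prop :=
  ∀ i : Nat, i < A.length →
    ∃ c ∈ C.take (m.toNat + 1), A.getD i 0 ≤ c ∧ c ≤ B.getD i 0

lemma pv_getD_wrap (pN : List Int) (n : Nat) (hlen : pN.length = n) (x : Int)
    (hx1 : -(n : Int) ≤ x) (hx0 : x < 0) :
    PySem.List.pyGetD pN x 0 = PySem.List.pyGetD pN (x + n) 0 := by
  unfold PySem.List.pyGetD PySem.List.pyGet? PySem.List.pyIdx?
  split_ifs <;> try omega
  all_goals simp only [Option.bind_some]
  all_goals congr 2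
  all_goals omega

lemma pv_check_master (A B C : List Int)
    (hC : ∀ c ∈ C, 0 ≤ c ∧ c ≤ 2 * (C.length : Int))
    (m : Int) (hm0 : 0 ≤ m) (hm1 : m ≤ (C.length : Int) - 1) :
    ∃ pN : List Int,
      pvCheck A B C m = pvCheckLoop A B pN (PySem.List.pyRange 0 (A.length : Int) 1) ∧
      pN.length = 2 * C.length + 1 ∧
      ∀ p : Nat, p < 2 * C.length + 1 →
        PySem.List.pyGetD pN (p : Int) 0 =
          ((C.take (m.toNat + 1)).countP (fun c => decide (c ≤ (p : Int))) : Int) := by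
  set n := 2 * C.length + 1 with hn
  set k := m.toNat + 1 with hkdef
  have hkC : k ≤ C.length := by omega
  have hm1' : m + 1 = ((k : Nat) : Int) := by omega
  have HC' : ∀ c ∈ C, 0 ≤ c ∧ c < (n : Int) := by
    intro c hc; have := hC c hc
    refine ⟨this.1, ?_⟩; rw [hn]; push_cast; omega
  obtain ⟨h1len, h1val⟩ := pv_step1 C n HC' (List.replicate n 0) (by simp) k hkC
  set N1 := (PySem.List.pyRange 0 ((k : Nat) : Int) 1).foldl
      (fun pN i => PySem.List.pySetD pN (PySem.List.pyGetD C i 0)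
        (PySem.List.pyGetD pN (PySem.List.pyGetD C i 0) 0 + 1))
      (List.replicate n (0 : Int)) with hN1
  obtain ⟨h2len, h2val⟩ := pv_step2 n N1 h1len n (le_refl n)
  set N2 := (PySem.List.pyRange 1 ((n : Nat) : Int) 1).foldl
      (fun pN i => PySem.List.pySetD pN i
        (PySem.List.pyGetD pN i 0 + PySem.List.pyGetD pN (i - 1) 0)) N1 with hN2
  have hval1 : ∀ q : Nat, q < n → PySem.List.pyGetD N1 (q : Int) 0 =
      ((C.take k).countP (fun c => decide (c = (q : Int))) : Int) := by
    intro q hq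
    rw [h1val q hq, PySem.List.pyGetD_natCast, List.getD_replicate 0 hq, zero_add]
  have hT0 : ∀ c ∈ C.take k, 0 ≤ c := fun c hc => (hC c (List.mem_of_mem_take hc)).1
  refine ⟨N2, ?_, h2len, ?_⟩
  · simp only [pvCheck]
    rw [hm1', ← hn, ← hN1, h1len, ← hN2]
  · intro p hp
    rw [h2val p hp, if_pos hp]
    exact pv_sum_take (C.take k) n hT0 N1 h1len hval1 p hp

-- the per-plank test against the prefix-count array, for a plank inside the 1-based range
lemma pv_cond_iff (A B C pN : List Int) (k : Nat)
    (hcnt : ∀ p : Nat, p < 2 * C.length + 1 → PySem.List.pyGetD pN (p : Int) 0 =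
      ((C.take k).countP (fun c => decide (c ≤ (p : Int))) : Int))
    (i : Nat)
    (ha1 : 1 ≤ A.getD i 0) (ha2 : A.getD i 0 ≤ 2 * (C.length : Int) + 1)
    (hb1 : 0 ≤ B.getD i 0) (hb2 : B.getD i 0 ≤ 2 * (C.length : Int)) :
    ((PySem.List.pyGetD pN (PySem.List.pyGetD B (i : Int) 0) 0 ≤
      PySem.List.pyGetD pN (PySem.List.pyGetD A (i : Int) 0 - 1) 0) ↔
     ¬ ∃ c ∈ C.take k, A.getD i 0 ≤ c ∧ c ≤ B.getD i 0) := by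
  rw [PySem.List.pyGetD_natCast B, PySem.List.pyGetD_natCast A]
  set a := A.getD i 0 with ha
  set b := B.getD i 0 with hb
  have hbn : b = ((b.toNat : Nat) : Int) := (Int.toNat_of_nonneg hb1).symm
  have h1 : PySem.List.pyGetD pN b 0 =
      ((C.take k).countP (fun c => decide (c ≤ b)) : Int) := by
    rw [hbn]; exact hcnt b.toNat (by omega)
  have han : a - 1 = (((a - 1).toNat : Nat) : Int) := by omega
  have h2 : PySem.List.pyGetD pN (a - 1) 0 =
      ((C.take k).countP (fun c => decide (c ≤ a - 1)) : Int) := by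
    rw [han]; exact hcnt (a - 1).toNat (by omega)
  rw [h1, h2]
  have hiff := pv_cnt_lt_iff a b (C.take k)
  constructor
  · intro hle hex
    have := hiff.mpr hex
    omega
  · intro hnex
    by_contra hlt
    exact hnex (hiff.mp (by omega))

lemma pv_check_iff (A B C : List Int) (hAB : A.length ≤ B.length)
    (hA : ∀ a ∈ A, 1 ≤ a ∧ a ≤ 2 * (C.length : Int) + 1)
    (hB : ∀ b ∈ B.take A.length, 0 ≤ b ∧ b ≤ 2 * (C.length : Int))
    (hC : ∀ c ∈ C, 0 ≤ c ∧ c ≤ 2 * (C.length : Int))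
    (m : Int) (hm0 : 0 ≤ m) (hm1 : m ≤ (C.length : Int) - 1) :
    (pvCheck A B C m = true) ↔ pvCov A B C m := by
  obtain ⟨pN, hunf, hlen, hcnt⟩ := pv_check_master A B C hC m hm0 hm1
  have hbounds : ∀ i : Nat, i < A.length →
      1 ≤ A.getD i 0 ∧ A.getD i 0 ≤ 2 * (C.length : Int) + 1 ∧
      0 ≤ B.getD i 0 ∧ B.getD i 0 ≤ 2 * (C.length : Int) := by
    intro i hi
    have hiB : i < B.length := by omega
    have haM : 1 ≤ A.getD i 0 ∧ A.getD i 0 ≤ 2 * (C.length : Int) + 1 := by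
      refine hA _ ?_
      rw [List.getD_eq_getElem _ _ hi]; exact List.getElem_mem hi
    have hbM : 0 ≤ B.getD i 0 ∧ B.getD i 0 ≤ 2 * (C.length : Int) := by
      refine hB _ ?_
      have h1 : (B.take A.length)[i]'(by simp; omega) = B[i] := List.getElem_take
      rw [List.getD_eq_getElem _ _ hiB, ← h1]
      exact List.getElem_mem _
    exact ⟨haM.1, haM.2, hbM.1, hbM.2⟩
  rw [hunf, pv_checkLoop_iff]
  constructor
  · intro hall i hi
    have hmem : ((i : Nat) : Int) ∈ PySem.List.pyRange 0 (A.length : Int) 1 :=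
      PySem.List.mem_pyRange_one.mpr ⟨by positivity, by exact_mod_cast hi⟩
    have h := hall _ hmem
    obtain ⟨q1, q2, q3, q4⟩ := hbounds i hi
    by_contra hno
    exact h ((pv_cond_iff A B C pN _ hcnt i q1 q2 q3 q4).mpr hno)
  · intro hcov i hmem
    obtain ⟨hi0, hiu⟩ := PySem.List.mem_pyRange_one.mp hmem
    have hi' : i.toNat < A.length := by omega
    obtain ⟨q1, q2, q3, q4⟩ := hbounds i.toNat hi'
    rw [show i = ((i.toNat : Nat) : Int) by omega]
    intro hle
    exact (pv_cond_iff A B C pN _ hcnt i.toNat q1 q2 q3 q4).mp hle (hcov i.toNat hi')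

-- check is false whenever some bounded plank has no covering nail at all
lemma pv_check_false (A B C : List Int)
    (hC : ∀ c ∈ C, 0 ≤ c ∧ c ≤ 2 * (C.length : Int))
    (m : Int) (hm0 : 0 ≤ m) (hm1 : m ≤ (C.length : Int) - 1) (i : Nat) (hiA : i < A.length)
    (ha1 : 1 ≤ A.getD i 0) (ha2 : A.getD i 0 ≤ 2 * (C.length : Int) + 1)
    (hb1 : 0 ≤ B.getD i 0) (hb2 : B.getD i 0 ≤ 2 * (C.length : Int))
    (hnc : ∀ c ∈ C, ¬(A.getD i 0 ≤ c ∧ c ≤ B.getD i 0)) : pvCheck A B C m = false := by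
  obtain ⟨pN, hunf, hlen, hcnt⟩ := pv_check_master A B C hC m hm0 hm1
  cases h : pvCheck A B C m with
  | false => rfl
  | true =>
    exfalso
    rw [hunf] at h
    have hall := (pv_checkLoop_iff A B pN _).mp h
    have hmem : ((i : Nat) : Int) ∈ PySem.List.pyRange 0 (A.length : Int) 1 :=
      PySem.List.mem_pyRange_one.mpr ⟨by positivity, by exact_mod_cast hiA⟩
    have hni := hall _ hmem
    rw [pv_cond_iff A B C pN _ hcnt i ha1 ha2 hb1 hb2] at hni
    obtain ⟨c, hc, h1, h2⟩ := not_not.mp hni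
    exact hnc c (List.mem_of_mem_take hc) ⟨h1, h2⟩

-- ---- wrapped counting: the first pass with nails at possibly negative (wrapped) positions ----
lemma pv_setD_wrap (l : List Int) (n : Nat) (hlen : l.length = n) (x : Int) (v : Int)
    (hx1 : -(n : Int) ≤ x) (hx0 : x < 0) :
    PySem.List.pySetD l x v = PySem.List.pySetD l (x + n) v := by
  unfold PySem.List.pySetD PySem.List.pySet? PySem.List.pyIdx?
  split_ifs <;> try omega
  all_goals simp only [Option.map_some, Option.getD_some]
  all_goals congr 2
  all_goals omega

-- like pv_step1, but each nail value c hits the wrapped position (c + n if c < 0 else c)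
lemma pv_step1W (C' : List Int) (n : Nat)
    (HC : ∀ c ∈ C', -(n : Int) ≤ c ∧ c < (n : Int))
    (l0 : List Int) (hl : l0.length = n) :
    ∀ k : Nat, k ≤ C'.length →
    (((PySem.List.pyRange 0 (k : Int) 1).foldl
        (fun pN i => PySem.List.pySetD pN (PySem.List.pyGetD C' i 0)
          (PySem.List.pyGetD pN (PySem.List.pyGetD C' i 0) 0 + 1)) l0).length = n ∧
     ∀ p : Nat, p < n →
        PySem.List.pyGetD ((PySem.List.pyRange 0 (k : Int) 1).foldl
          (fun pN i => PySem.List.pySetD pN (PySem.List.pyGetD C' i 0)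
            (PySem.List.pyGetD pN (PySem.List.pyGetD C' i 0) 0 + 1)) l0) (p : Int) 0
        = PySem.List.pyGetD l0 (p : Int) 0 +
          ((C'.take k).countP
            (fun c => decide ((if c < 0 then c + (n : Int) else c) = (p : Int))) : Int)) := by
  intro k
  induction k with
  | zero =>
    intro _
    rw [show ((0 : Nat) : Int) = 0 by simp, PySem.List.pyRange_one_eq_nil (le_refl 0)]
    simp [hl]
  | succ k ih =>
    intro hk
    obtain ⟨ihlen, ihval⟩ := ih (by omega)
    have hkC : k < C'.length := by omega
    have hsplit : PySem.List.pyRange 0 ((k : Int) + 1) 1 =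
        PySem.List.pyRange 0 (k : Int) 1 ++ [(k : Int)] :=
      PySem.List.pyRange_one_succ_right (by positivity)
    rw [show ((k + 1 : Nat) : Int) = (k : Int) + 1 by push_cast; ring, hsplit, List.foldl_append,
        List.foldl_cons, List.foldl_nil]
    have hck : PySem.List.pyGetD C' (k : Int) 0 = C'[k] := by
      rw [PySem.List.pyGetD_natCast, List.getD_eq_getElem _ _ hkC]
    have hc := HC C'[k] (List.getElem_mem hkC)
    obtain ⟨m, hmval, hmn⟩ : ∃ m : Nat,
        (if C'[k] < 0 then C'[k] + (n : Int) else C'[k]) = (m : Int) ∧ m < n := by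
      by_cases hneg : C'[k] < 0
      · exact ⟨(C'[k] + n).toNat, by rw [if_pos hneg]; omega, by omega⟩
      · exact ⟨(C'[k]).toNat, by rw [if_neg hneg]; omega, by omega⟩
    set F := (PySem.List.pyRange 0 (k : Int) 1).foldl
        (fun pN i => PySem.List.pySetD pN (PySem.List.pyGetD C' i 0)
          (PySem.List.pyGetD pN (PySem.List.pyGetD C' i 0) 0 + 1)) l0 with hF
    have hset : ∀ v : Int, PySem.List.pySetD F C'[k] v = PySem.List.pySetD F (m : Int) v := by
      intro v
      by_cases hneg : C'[k] < 0
      · rw [pv_setD_wrap F n ihlen _ v (by omega) hneg]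
        congr 1
        rw [if_pos hneg] at hmval
        omega
      · congr 1
        rw [if_neg hneg] at hmval
        omega
    have hget : PySem.List.pyGetD F C'[k] 0 = PySem.List.pyGetD F (m : Int) 0 := by
      by_cases hneg : C'[k] < 0
      · rw [pv_getD_wrap F n ihlen _ (by omega) hneg]
        congr 1
        rw [if_pos hneg] at hmval
        omega
      · congr 1
        rw [if_neg hneg] at hmval
        omega
    have htake : C'.take (k + 1) = C'.take k ++ [C'[k]] := by
      rw [List.take_add_one, List.getElem?_eq_getElem hkC]; rfl
    rw [hck, hset, hget]
    constructor
    · rw [PySem.List.length_pySetD, ihlen]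
    · intro p hp
      rw [PySem.List.pyGetD_pySetD_natCast _ m p _ 0 (by rw [ihlen]; exact hmn)]
      rw [htake, List.countP_append]
      by_cases hpm : p = m
      · subst hpm
        rw [if_pos rfl, ihval p hp]
        simp only [List.countP_cons, List.countP_nil, hmval]
        simp
        omega
      · rw [if_neg (by omega), ihval p hp]
        have : ((if C'[k] < 0 then C'[k] + (n : Int) else C'[k]) = (p : Int)) = False := by
          simp only [eq_iff_iff, iff_false, hmval]
          intro hcon
          exact hpm (by exact_mod_cast hcon.symm)
        simp [this]

-- the prefix-summed counting array counts wrapped nail positions ≤ p, for any indexable nails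
lemma pv_check_masterW (A B C : List Int)
    (hC : ∀ c ∈ C, -(2 * (C.length : Int) + 1) ≤ c ∧ c ≤ 2 * (C.length : Int))
    (m : Int) (hm0 : 0 ≤ m) (hm1 : m ≤ (C.length : Int) - 1) :
    ∃ pN : List Int,
      pvCheck A B C m = pvCheckLoop A B pN (PySem.List.pyRange 0 (A.length : Int) 1) ∧
      pN.length = 2 * C.length + 1 ∧
      ∀ p : Nat, p < 2 * C.length + 1 →
        PySem.List.pyGetD pN (p : Int) 0 =
          ((C.take (m.toNat + 1)).countP
            (fun c => decide ((if c < 0 then c + ((2 * C.length + 1 : Nat) : Int) else c)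
              ≤ (p : Int))) : Int) := by
  set n := 2 * C.length + 1 with hn
  set k := m.toNat + 1 with hkdef
  have hkC : k ≤ C.length := by omega
  have hm1' : m + 1 = ((k : Nat) : Int) := by omega
  have HC' : ∀ c ∈ C, -(n : Int) ≤ c ∧ c < (n : Int) := by
    intro c hc; have := hC c hc
    constructor <;> [skip; skip] <;> rw [hn] <;> push_cast <;> omega
  obtain ⟨h1len, h1val⟩ := pv_step1W C n HC' (List.replicate n 0) (by simp) k hkC
  set N1 := (PySem.List.pyRange 0 ((k : Nat) : Int) 1).foldl
      (fun pN i => PySem.List.pySetD pN (PySem.List.pyGetD C i 0)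
        (PySem.List.pyGetD pN (PySem.List.pyGetD C i 0) 0 + 1))
      (List.replicate n (0 : Int)) with hN1
  obtain ⟨h2len, h2val⟩ := pv_step2 n N1 h1len n (le_refl n)
  set N2 := (PySem.List.pyRange 1 ((n : Nat) : Int) 1).foldl
      (fun pN i => PySem.List.pySetD pN i
        (PySem.List.pyGetD pN i 0 + PySem.List.pyGetD pN (i - 1) 0)) N1 with hN2
  set T' := (C.take k).map (fun c => if c < 0 then c + (n : Int) else c) with hT'
  have hval1 : ∀ q : Nat, q < n → PySem.List.pyGetD N1 (q : Int) 0 =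
      ((T'.countP (fun c => decide (c = (q : Int)))) : Int) := by
    intro q hq
    rw [h1val q hq, PySem.List.pyGetD_natCast, List.getD_replicate 0 hq, zero_add, hT',
        List.countP_map]
    rfl
  have hT0 : ∀ c ∈ T', 0 ≤ c := by
    intro t ht
    rw [hT'] at ht
    obtain ⟨c, hc, rfl⟩ := List.mem_map.mp ht
    have := HC' c (List.mem_of_mem_take hc)
    split_ifs <;> omega
  refine ⟨N2, ?_, h2len, ?_⟩
  · simp only [pvCheck]
    rw [hm1', ← hn, ← hN1, h1len, ← hN2]
  · intro p hp
    rw [h2val p hp, if_pos hp,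
        pv_sum_take T' n hT0 N1 h1len hval1 p hp, hT', List.countP_map]
    rfl

-- check is false whenever some raise-free plank's wrapped index window contains no wrapped nail
lemma pv_check_false_wrap (A B C : List Int)
    (hC : ∀ c ∈ C, -(2 * (C.length : Int) + 1) ≤ c ∧ c ≤ 2 * (C.length : Int))
    (m : Int) (hm0 : 0 ≤ m) (hm1 : m ≤ (C.length : Int) - 1) (i : Nat) (hiA : i < A.length)
    (hwa1 : -(2 * (C.length : Int) + 1) ≤ A.getD i 0 - 1)
    (hwa2 : A.getD i 0 - 1 ≤ 2 * (C.length : Int))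
    (hwb1 : -(2 * (C.length : Int) + 1) ≤ B.getD i 0)
    (hwb2 : B.getD i 0 ≤ 2 * (C.length : Int))
    (hwin : ∀ c ∈ C,
      ¬((if A.getD i 0 - 1 < 0 then A.getD i 0 - 1 + 2 * (C.length : Int) + 1
         else A.getD i 0 - 1) <
        (if c < 0 then c + 2 * (C.length : Int) + 1 else c) ∧
        (if c < 0 then c + 2 * (C.length : Int) + 1 else c) ≤
        (if B.getD i 0 < 0 then B.getD i 0 + 2 * (C.length : Int) + 1
         else B.getD i 0))) : pvCheck A B C m = false := by
  obtain ⟨pN, hunf, hlen, hcnt⟩ := pv_check_masterW A B C hC m hm0 hm1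
  cases h : pvCheck A B C m with
  | false => rfl
  | true =>
    exfalso
    rw [hunf] at h
    have hall := (pv_checkLoop_iff A B pN _).mp h
    have hmem : ((i : Nat) : Int) ∈ PySem.List.pyRange 0 (A.length : Int) 1 :=
      PySem.List.mem_pyRange_one.mpr ⟨by positivity, by exact_mod_cast hiA⟩
    have hni := hall _ hmem
    apply hni
    rw [PySem.List.pyGetD_natCast B, PySem.List.pyGetD_natCast A]
    set a1 := A.getD i 0 - 1 with ha1d
    set b := B.getD i 0 with hbd
    set wa := (if a1 < 0 then a1 + 2 * (C.length : Int) + 1 else a1) with hwa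
    set wb := (if b < 0 then b + 2 * (C.length : Int) + 1 else b) with hwb
    have hwa0 : 0 ≤ wa ∧ wa ≤ 2 * (C.length : Int) := by rw [hwa]; split_ifs <;> omega
    have hwb0 : 0 ≤ wb ∧ wb ≤ 2 * (C.length : Int) := by rw [hwb]; split_ifs <;> omega
    have hgb : PySem.List.pyGetD pN b 0 = PySem.List.pyGetD pN wb 0 := by
      rw [hwb]
      split_ifs with hneg
      · rw [pv_getD_wrap pN (2 * C.length + 1) hlen b (by push_cast; omega) hneg]
        congr 1; push_cast; ring
      · rfl
    have hga : PySem.List.pyGetD pN a1 0 = PySem.List.pyGetD pN wa 0 := by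
      rw [hwa]
      split_ifs with hneg
      · rw [pv_getD_wrap pN (2 * C.length + 1) hlen a1 (by push_cast; omega) hneg]
        congr 1; push_cast; ring
      · rfl
    have hvb : PySem.List.pyGetD pN wb 0 =
        (((C.take (m.toNat + 1)).countP
          (fun c => decide ((if c < 0 then c + ((2 * C.length + 1 : Nat) : Int) else c)
            ≤ wb))) : Int) := by
      rw [show wb = ((wb.toNat : Nat) : Int) by omega]
      exact hcnt wb.toNat (by omega)
    have hva : PySem.List.pyGetD pN wa 0 =
        (((C.take (m.toNat + 1)).countP
          (fun c => decide ((if c < 0 then c + ((2 * C.length + 1 : Nat) : Int) else c)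
            ≤ wa))) : Int) := by
      rw [show wa = ((wa.toNat : Nat) : Int) by omega]
      exact hcnt wa.toNat (by omega)
    rw [hgb, hga, hvb, hva]
    have hmono : ((C.take (m.toNat + 1)).countP
          (fun c => decide ((if c < 0 then c + ((2 * C.length + 1 : Nat) : Int) else c) ≤ wb)))
        ≤ ((C.take (m.toNat + 1)).countP
          (fun c => decide ((if c < 0 then c + ((2 * C.length + 1 : Nat) : Int) else c) ≤ wa))) := by
      refine List.countP_mono_left ?_
      intro c hcm hcb
      have hcC : c ∈ C := List.mem_of_mem_take hcm
      have hwc := hwin c hcC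
      simp only [decide_eq_true_eq] at hcb ⊢
      push_cast at hcb ⊢
      split_ifs at hcb ⊢ with hneg
      all_goals split_ifs at hwc <;> omega
    omega

lemma pv_cov_mono (A B C : List Int) (m m' : Int) (h : m ≤ m') (hcov : pvCov A B C m) :
    pvCov A B C m' := by
  intro i hi
  obtain ⟨c, hc, h1, h2⟩ := hcov i hi
  exact ⟨c, pv_mem_take_mono (by omega) hc, h1, h2⟩

-- ---- the binary search returns ans when check is false everywhere in range ----
lemma pv_bs_none (A B C : List Int)
    (hfalse : ∀ m', 0 ≤ m' → m' ≤ (C.length : Int) - 1 → pvCheck A B C m' = false) :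
    ∀ (N : Nat) (s e ans : Int), (e + 1 - s).toNat ≤ N → 0 ≤ s → e ≤ (C.length : Int) - 1 →
    pvBS A B C s e ans = ans := by
  intro N
  induction N with
  | zero =>
    intro s e ans hN hs he
    rw [pvBS, dif_neg (by omega)]
  | succ N ih =>
    intro s e ans hN hs he
    rw [pvBS]
    by_cases hse : s ≤ e
    · rw [dif_pos hse]
      have hmid := PySem.Int.floordiv_two_mid_bounds hse
      show (if pvCheck A B C (PySem.Int.floordiv (s + e) 2) = true then _ else _) = ans
      rw [if_neg (by rw [hfalse _ (by omega) (by omega)]; simp)]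
      exact ih (PySem.Int.floordiv (s + e) 2 + 1) e ans (by omega) (by omega) he
    · rw [dif_neg hse]

-- ---- the binary search returns k+1 when k is the least index with check true ----
lemma pv_bs_some (A B C : List Int) (k : Int)
    (hleast : ∀ m', 0 ≤ m' → m' < k → pvCheck A B C m' = false)
    (hmono : ∀ m', k ≤ m' → m' ≤ (C.length : Int) - 1 → pvCheck A B C m' = true) :
    ∀ (N : Nat) (s e ans : Int), (e + 1 - s).toNat ≤ N → 0 ≤ s → s ≤ k →
    e ≤ (C.length : Int) - 1 → (k ≤ e ∨ ans = k + 1) → pvBS A B C s e ans = k + 1 := by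
  intro N
  induction N with
  | zero =>
    intro s e ans hN hs hsk he hd
    rw [pvBS, dif_neg (by omega)]
    omega
  | succ N ih =>
    intro s e ans hN hs hsk he hd
    rw [pvBS]
    by_cases hse : s ≤ e
    · rw [dif_pos hse]
      have hmid := PySem.Int.floordiv_two_mid_bounds hse
      set mid := PySem.Int.floordiv (s + e) 2 with hmiddef
      show (if pvCheck A B C mid = true then _ else _) = k + 1
      by_cases hcm : pvCheck A B C mid = true
      · rw [if_pos hcm]
        have hkmid : k ≤ mid := by
          by_contra hlt
          rw [hleast mid (by omega) (by omega)] at hcm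
          cases hcm
        exact ih s (mid - 1) (mid + 1) (by omega) hs hsk (by omega) (by omega)
      · rw [if_neg hcm]
        have hmidk : mid < k := by
          by_contra hge
          exact hcm (hmono mid (by omega) (by omega))
        exact ih (mid + 1) e ans (by omega) (by omega) (by omega) he hd
    · rw [dif_neg hse]
      omega

-- ---- the A = [] case: check is vacuously true, the search lands on nail 0 ----
lemma pv_check_empty (B C : List Int) (m : Int) : pvCheck [] B C m = true := by
  simp only [pvCheck]
  rw [show ((List.length ([] : List Int) : Nat) : Int) = 0 by simp,
      PySem.List.pyRange_one_eq_nil (le_refl 0)]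
  rfl

lemma pv_solution_empty (B C : List Int) (hC : C ≠ []) : solution [] B C = 1 := by
  have hL : 0 < C.length := List.length_pos_iff.mpr hC
  unfold solution
  rw [pv_bs_some [] B C 0 (by intro m' h0 h1; omega) (fun m' _ _ => pv_check_empty B C m')
      (((C.length : Int) - 1 + 1 - 0).toNat) 0 ((C.length : Int) - 1) (-1) (le_refl _)
      (by omega) (by omega) (by omega) (by omega)]
  norm_num

-- ===== VERDICT (by name: the statement is the Claim_ definition above) =====
theorem solution_spec : Claim_unchanged_solution := by
  unfold Claim_unchanged_solution Spec_solution D_solution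
  intro A B C hdom hpre hnd
  rcases hpre with ⟨hAnil, _⟩ | ⟨hne, hbr⟩
  · refine absurd ⟨?_, ?_⟩ hnd
    · intro p hp; rw [hAnil] at hp; cases hp
    · rintro ⟨hne', _⟩; exact hne' (by rw [hAnil]; rfl)
  have hAne : 0 < A.length := List.length_pos_iff.mpr hne
  have hzne : A.zip B ≠ [] := by
    intro h0
    refine hnd ⟨?_, ?_⟩
    · intro p hp; rw [h0] at hp; cases hp
    · rintro ⟨hne', _⟩; exact hne' h0
  rcases hbr with hCnil | ⟨hCne, hbr2⟩
  · -- no nails at all: A's loop never runs, B's first scan finds nothing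
    subst hCnil
    have hzlen : 0 < (A.zip B).length := List.length_pos_iff.mpr hzne
    unfold solution solution_alt
    rw [pv_go_none [] (A.zip B) 0 ⟨(A.zip B)[0]'hzlen, List.getElem_mem hzlen, rfl⟩]
    rw [pvBS, dif_neg (by norm_num)]
  · rcases hbr2 with ⟨hC, hfull | ⟨i, hiA, hiB, hprev, ha1, ha2, hb1', hb2', hnc⟩⟩ |
      ⟨hCidx, i, hiA, hiB, hprev, hwa1, hwa2, hwb1, hwb2, hwin, i2, hi2A, hi2B, hnc2⟩ |
      ⟨hCidx2, i, hiA, hiB, hprev, ha0, hza1, hb0, hb2z, hspan⟩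
    · -- all planks in bounds
      obtain ⟨hAB, hA, hB⟩ := hfull
      have hzlen : (A.zip B).length = A.length := by rw [List.length_zip]; omega
      by_cases hall : ∀ p ∈ A.zip B, ∃ j, pvFirstNail p.1 p.2 C 0 = some j
      · -- every plank has a covering nail: both sides return (max first-hit index) + 1
        obtain ⟨q, rest, hzq⟩ : ∃ q rest, A.zip B = q :: rest := by
          cases hz : A.zip B with
          | nil => rw [hz] at hzlen; simp at hzlen; omega
          | cons q rest => exact ⟨q, rest, rfl⟩
        have hqmem : q ∈ A.zip B := by rw [hzq]; exact List.mem_cons_self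
        have hge1 : 1 ≤ pvGo C (A.zip B) 0 := by
          obtain ⟨jq, hjq⟩ := hall q hqmem
          have h0 := pv_fn_nonneg _ _ _ _ hjq
          rw [hzq]
          simp only [pvGo, hjq]
          have := pv_go_ge C rest (max 0 (jq + 1))
            (fun p hp => hall p (by rw [hzq]; exact List.mem_cons_of_mem _ hp))
          omega
        rcases pv_go_max C (A.zip B) 0 hall with heq0 | ⟨p₀, hp₀, j₀, hj₀, hgval⟩
        · omega
        · have hj₀0 : 0 ≤ j₀ := pv_fn_nonneg _ _ _ _ hj₀
          have hj₀L : j₀ < (C.length : Int) := pv_fn_lt_length _ _ _ _ hj₀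
          obtain ⟨i₀, hi₀, hgi₀⟩ := List.getElem_of_mem hp₀
          have hi₀A : i₀ < A.length := by omega
          have hi₀B : i₀ < B.length := by omega
          have hzip₀ : (A.zip B)[i₀]'(hi₀) = (A[i₀]'hi₀A, B[i₀]'hi₀B) := List.getElem_zip
          have hCovK : pvCov A B C j₀ := by
            intro i hi
            have hiz : i < (A.zip B).length := by omega
            have hpi : (A.zip B)[i]'hiz ∈ A.zip B := List.getElem_mem hiz
            obtain ⟨ji, hji⟩ := hall _ hpi
            have hub := pv_go_ub C (A.zip B) 0 hall _ hpi ji hji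
            rw [hgval] at hub
            obtain ⟨c, hc, h1, h2⟩ :=
              (pv_fn_take_iff ((A.zip B)[i]'hiz).1 ((A.zip B)[i]'hiz).2 C (j₀.toNat + 1)).mpr
                ⟨ji, hji, by push_cast; omega⟩
            have hzipi : (A.zip B)[i]'hiz = (A[i]'hi, B[i]'(by omega)) := List.getElem_zip
            rw [hzipi] at h1 h2
            refine ⟨c, hc, ?_, ?_⟩
            · rw [List.getD_eq_getElem _ _ hi]; exact h1
            · rw [List.getD_eq_getElem _ _ (by omega : i < B.length)]; exact h2
          have hchk : pvCheck A B C j₀ = true :=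
            (pv_check_iff A B C hAB hA hB hC j₀ hj₀0 (by omega)).mpr hCovK
          have hleast : ∀ m', 0 ≤ m' → m' < j₀ → pvCheck A B C m' = false := by
            intro m' h0 h1
            cases hch : pvCheck A B C m' with
            | false => rfl
            | true =>
              exfalso
              have hcov := (pv_check_iff A B C hAB hA hB hC m' h0 (by omega)).mp hch
              obtain ⟨c, hc, hc1, hc2⟩ := hcov i₀ hi₀A
              rw [List.getD_eq_getElem _ _ hi₀A] at hc1
              rw [List.getD_eq_getElem _ _ hi₀B] at hc2
              have hmem : ∃ c ∈ C.take (m'.toNat + 1), p₀.1 ≤ c ∧ c ≤ p₀.2 := by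
                refine ⟨c, hc, ?_, ?_⟩
                · rw [← hgi₀, hzip₀]; exact hc1
                · rw [← hgi₀, hzip₀]; exact hc2
              obtain ⟨j, hj, hjlt⟩ := (pv_fn_take_iff p₀.1 p₀.2 C (m'.toNat + 1)).mp hmem
              rw [hj₀] at hj
              cases hj
              push_cast at hjlt
              omega
          have hmono : ∀ m', j₀ ≤ m' → m' ≤ (C.length : Int) - 1 → pvCheck A B C m' = true := by
            intro m' hge hle
            exact (pv_check_iff A B C hAB hA hB hC m' (by omega) hle).mpr
              (pv_cov_mono A B C j₀ m' hge hCovK)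
          unfold solution solution_alt
          rw [pv_bs_some A B C j₀ hleast hmono (((C.length : Int) - 1 + 1 - 0).toNat) 0
              ((C.length : Int) - 1) (-1) (le_refl _) (by omega) (by omega) (by omega) (by omega)]
          rw [hgval]
      · -- some plank has no covering nail: both sides return -1
        have hex : ∃ p ∈ A.zip B, pvFirstNail p.1 p.2 C 0 = none := by
          by_contra hno
          apply hall
          intro p hp
          cases hF : pvFirstNail p.1 p.2 C 0 with
          | none => exact absurd ⟨p, hp, hF⟩ hno
          | some j => exact ⟨j, rfl⟩
        obtain ⟨p₀, hp₀, hF₀⟩ := hex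
        obtain ⟨i₀, hi₀, hgi₀⟩ := List.getElem_of_mem hp₀
        have hi₀A : i₀ < A.length := by omega
        have hi₀B : i₀ < B.length := by omega
        have hzip₀ : (A.zip B)[i₀]'(hi₀) = (A[i₀]'hi₀A, B[i₀]'hi₀B) := List.getElem_zip
        have hfalse : ∀ m', 0 ≤ m' → m' ≤ (C.length : Int) - 1 → pvCheck A B C m' = false := by
          intro m' h0 h1
          cases hch : pvCheck A B C m' with
          | false => rfl
          | true =>
            exfalso
            have hcov := (pv_check_iff A B C hAB hA hB hC m' h0 h1).mp hch
            obtain ⟨c, hc, hc1, hc2⟩ := hcov i₀ hi₀A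
            have hnone := (pv_fn_none_iff p₀.1 p₀.2 C).mp hF₀ c (List.mem_of_mem_take hc)
            rw [List.getD_eq_getElem _ _ hi₀A] at hc1
            rw [List.getD_eq_getElem _ _ hi₀B] at hc2
            rw [← hgi₀, hzip₀] at hnone
            exact hnone ⟨hc1, hc2⟩
        unfold solution solution_alt
        rw [pv_go_none C (A.zip B) 0 ⟨p₀, hp₀, hF₀⟩]
        exact pv_bs_none A B C hfalse (((C.length : Int) - 1 + 1 - 0).toNat) 0
          ((C.length : Int) - 1) (-1) (le_refl _) (by omega) (by omega)
    · -- a raise-free bounded plank that no nail covers: both sides return -1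
      have hiz : i < (A.zip B).length := by rw [List.length_zip]; omega
      have hzipi : (A.zip B)[i]'hiz = (A[i]'hiA, B[i]'hiB) := List.getElem_zip
      have hFnone : pvFirstNail ((A.zip B)[i]'hiz).1 ((A.zip B)[i]'hiz).2 C 0 = none := by
        rw [hzipi]
        refine (pv_fn_none_iff _ _ C).mpr ?_
        intro c hc
        have h := hnc c hc
        rw [List.getD_eq_getElem _ _ hiA, List.getD_eq_getElem _ _ hiB] at h
        exact h
      unfold solution solution_alt
      rw [pv_go_none C (A.zip B) 0 ⟨_, List.getElem_mem hiz, hFnone⟩]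
      exact pv_bs_none A B C
        (fun m' h0 h1 => pv_check_false A B C hC m' h0 h1 i hiA ha1 ha2 hb1' hb2' hnc)
        (((C.length : Int) - 1 + 1 - 0).toNat) 0 ((C.length : Int) - 1) (-1)
        (le_refl _) (by omega) (by omega)
    · -- a plank whose wrapped index window holds no nail, and a plank no nail covers: both -1
      have hiz2 : i2 < (A.zip B).length := by rw [List.length_zip]; omega
      have hzipi2 : (A.zip B)[i2]'hiz2 = (A[i2]'hi2A, B[i2]'hi2B) := List.getElem_zip
      have hFnone : pvFirstNail ((A.zip B)[i2]'hiz2).1 ((A.zip B)[i2]'hiz2).2 C 0 = none := by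
        rw [hzipi2]
        refine (pv_fn_none_iff _ _ C).mpr ?_
        intro c hc
        have h := hnc2 c hc
        rw [List.getD_eq_getElem _ _ hi2A, List.getD_eq_getElem _ _ hi2B] at h
        exact h
      unfold solution solution_alt
      rw [pv_go_none C (A.zip B) 0 ⟨_, List.getElem_mem hiz2, hFnone⟩]
      exact pv_bs_none A B C
        (fun m' h0 h1 => pv_check_false_wrap A B C hCidx m' h0 h1 i hiA hwa1 hwa2 hwb1 hwb2 hwin)
        (((C.length : Int) - 1 + 1 - 0).toNat) 0 ((C.length : Int) - 1) (-1)
        (le_refl _) (by omega) (by omega)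
    · -- a plank touching position ≤ 0 spanning at most the array: its test fails at every probe,
      -- and ¬D_ forces some genuinely uncoverable plank, so both sides return -1
      have hwin : ∀ c ∈ C,
          ¬((if A.getD i 0 - 1 < 0 then A.getD i 0 - 1 + 2 * (C.length : Int) + 1
             else A.getD i 0 - 1) <
            (if c < 0 then c + 2 * (C.length : Int) + 1 else c) ∧
            (if c < 0 then c + 2 * (C.length : Int) + 1 else c) ≤
            (if B.getD i 0 < 0 then B.getD i 0 + 2 * (C.length : Int) + 1
             else B.getD i 0)) := by
        intro c hc hcon
        obtain ⟨h1, h2⟩ := hcon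
        rw [if_pos (show A.getD i 0 - 1 < 0 by omega)] at h1
        rw [if_neg (show ¬ B.getD i 0 < 0 by omega)] at h2
        split_ifs at h1 h2 <;> omega
      have hiz : i < (A.zip B).length := by rw [List.length_zip]; omega
      have hcovfail : ∃ p ∈ A.zip B, ∀ c ∈ C, ¬(p.1 ≤ c ∧ c ≤ p.2) := by
        by_contra hno
        push_neg at hno
        refine hnd ⟨?_, ?_⟩
        · intro p hp
          obtain ⟨c, hc, hcc⟩ := hno p hp
          exact ⟨c, hc, by tauto⟩
        · rintro ⟨_, hall1⟩
          have h1 := hall1 ((A.zip B)[i]'hiz) (List.getElem_mem hiz)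
          rw [List.getElem_zip] at h1
          rw [List.getD_eq_getElem _ _ hiA] at ha0
          simp only at h1
          omega
      obtain ⟨p₀, hp₀, hF₀⟩ := hcovfail
      have hFnone : pvFirstNail p₀.1 p₀.2 C 0 = none := (pv_fn_none_iff _ _ C).mpr hF₀
      unfold solution solution_alt
      rw [pv_go_none C (A.zip B) 0 ⟨p₀, hp₀, hFnone⟩]
      exact pv_bs_none A B C
        (fun m' h0 h1 => pv_check_false_wrap A B C hCidx2 m' h0 h1 i hiA hza1 (by omega)
          (by omega) hb2z hwin)
        (((C.length : Int) - 1 + 1 - 0).toNat) 0 ((C.length : Int) - 1) (-1)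
        (le_refl _) (by omega) (by omega)

theorem solution_changed : Claim_changed_solution := by
  unfold Claim_changed_solution
  exact ⟨by decide, by decide, by decide, pv_solution_empty [] [1] (by decide), rfl, by decide⟩

theorem solution_tight : Claim_exact_solution := by
  unfold Claim_exact_solution D_solution
  intro A B C hdom hpre hd
  obtain ⟨hcov, hdeg⟩ := hd
  rcases hpre with ⟨hAnil, _⟩ | ⟨hne, hbr⟩
  · subst hAnil
    rw [show solution_alt [] B C = 0 from rfl]
    rcases eq_or_ne C [] with rfl | hCne
    · unfold solution
      rw [pvBS, dif_neg (by norm_num)]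
      norm_num
    · rw [pv_solution_empty B C hCne]
      norm_num
  · rcases hbr with hCnil | ⟨hCne, hbr2⟩
    · -- no nails: a covered plank is impossible, so the plank list is empty; A = -1, B = 0
      subst hCnil
      have hz : A.zip B = [] := by
        cases hz : A.zip B with
        | nil => rfl
        | cons p r =>
          obtain ⟨c, hc, _⟩ := hcov p (by rw [hz]; exact List.mem_cons_self)
          cases hc
      have halt : solution_alt A B [] = 0 := by unfold solution_alt; rw [hz]; rfl
      rw [halt]
      unfold solution
      rw [pvBS, dif_neg (by norm_num)]
      norm_num
    · have hAne : 0 < A.length := List.length_pos_iff.mpr hne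
      rcases hbr2 with ⟨hC, hfull | ⟨i, hiA, hiB, hprev, ha1, ha2, hb1', hb2', hnc⟩⟩ |
        ⟨hCidx, i, hiA, hiB, hprev, hwa1, hwa2, hwb1, hwb2, hwin, i2, hi2A, hi2B, hnc2⟩ |
        ⟨hCidx2, i, hiA, hiB, hprev, ha0, hza1, hb0, hb2z, hspan⟩
      · -- every plank 1-based: D_'s degeneracy clause is contradicted
        exfalso
        obtain ⟨hAB, hA, _⟩ := hfull
        refine hdeg ⟨?_, ?_⟩
        · intro h0
          have := List.length_zip (l₁ := A) (l₂ := B)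
          rw [h0] at this
          simp at this
          omega
        · intro p hp
          obtain ⟨ip, hip, hgip⟩ := List.getElem_of_mem hp
          have hipA : ip < A.length := by
            have := List.length_zip (l₁ := A) (l₂ := B); omega
          have := hA (A[ip]'hipA) (List.getElem_mem hipA)
          rw [← hgip, List.getElem_zip]
          simp only
          omega
      · -- an uncoverable plank contradicts D_'s coverage clause
        exfalso
        have hiz : i < (A.zip B).length := by rw [List.length_zip]; omega
        obtain ⟨c, hc, h1, h2⟩ := hcov ((A.zip B)[i]'hiz) (List.getElem_mem hiz)
        rw [List.getElem_zip] at h1 h2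
        have := hnc c hc
        rw [List.getD_eq_getElem _ _ hiA, List.getD_eq_getElem _ _ hiB] at this
        exact this ⟨h1, h2⟩
      · exfalso
        have hiz2 : i2 < (A.zip B).length := by rw [List.length_zip]; omega
        obtain ⟨c, hc, h1, h2⟩ := hcov ((A.zip B)[i2]'hiz2) (List.getElem_mem hiz2)
        rw [List.getElem_zip] at h1 h2
        have := hnc2 c hc
        rw [List.getD_eq_getElem _ _ hi2A, List.getD_eq_getElem _ _ hi2B] at this
        exact this ⟨h1, h2⟩
      · -- the zero-start plank's test fails at every probe: A = -1, while B counts the cover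
        have hwin : ∀ c ∈ C,
            ¬((if A.getD i 0 - 1 < 0 then A.getD i 0 - 1 + 2 * (C.length : Int) + 1
               else A.getD i 0 - 1) <
              (if c < 0 then c + 2 * (C.length : Int) + 1 else c) ∧
              (if c < 0 then c + 2 * (C.length : Int) + 1 else c) ≤
              (if B.getD i 0 < 0 then B.getD i 0 + 2 * (C.length : Int) + 1
               else B.getD i 0)) := by
          intro c hc hcon
          obtain ⟨h1, h2⟩ := hcon
          rw [if_pos (show A.getD i 0 - 1 < 0 by omega)] at h1
          rw [if_neg (show ¬ B.getD i 0 < 0 by omega)] at h2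
          split_ifs at h1 h2 <;> omega
        have hsol : solution A B C = -1 := by
          unfold solution
          exact pv_bs_none A B C
            (fun m' h0 h1 => pv_check_false_wrap A B C hCidx2 m' h0 h1 i hiA hza1 (by omega)
              (by omega) hb2z hwin)
            (((C.length : Int) - 1 + 1 - 0).toNat) 0 ((C.length : Int) - 1) (-1)
            (le_refl _) (by omega) (by omega)
        have hall : ∀ p ∈ A.zip B, ∃ j, pvFirstNail p.1 p.2 C 0 = some j := by
          intro p hp
          cases hF : pvFirstNail p.1 p.2 C 0 with
          | some j => exact ⟨j, rfl⟩
          | none =>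
            exfalso
            obtain ⟨c, hc, h1, h2⟩ := hcov p hp
            exact (pv_fn_none_iff p.1 p.2 C).mp hF c hc ⟨h1, h2⟩
        have hzlen : 0 < (A.zip B).length := by rw [List.length_zip]; omega
        have hge1 : 1 ≤ pvGo C (A.zip B) 0 := by
          obtain ⟨q, rest, hzq⟩ : ∃ q rest, A.zip B = q :: rest := by
            cases hz : A.zip B with
            | nil => rw [hz] at hzlen; cases hzlen
            | cons q rest => exact ⟨q, rest, rfl⟩
          obtain ⟨jq, hjq⟩ := hall q (by rw [hzq]; exact List.mem_cons_self)
          have h0 := pv_fn_nonneg _ _ _ _ hjq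
          rw [hzq]
          simp only [pvGo, hjq]
          have := pv_go_ge C rest (max 0 (jq + 1))
            (fun p hp => hall p (by rw [hzq]; exact List.mem_cons_of_mem _ hp))
          omega
        rw [hsol]
        unfold solution_alt
        omega
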